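-- pv_equiv track=rewrite | github.com/SimpliAj/DragonBot | cogs/topgg.py | build_vote_schedule_rows
-- ===== SOURCE A (Python) =====
-- PACK_EMOJIS = {
--     'wooden':  {'closed': '<:woodenchest:1446170002708238476>',  'open': '✅'},
--     'stone':   {'closed': '<:stonechest:1446169958265389247>',   'open': '✅'},
--     'bronze':  {'closed': '<:bronzechest:1446169758599745586>',  'open': '✅'},
--     'silver':  {'closed': '<:silverchest:1446169917996011520>',  'open': '✅'},
--     'gold':    {'closed': '<:goldchest:1446169876438978681>',    'open': '✅'},
--     'diamond': {'closed': '<:diamondchest:1446169830720929985>', 'open': '✅'},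
-- }
--
-- DRAGONSCALE_EMOJI = '<:dragonscale:1446278170998341693>'
--
-- DRAGONSCALE_EMOJI_CLAIMED = '✅'
--
-- def get_vote_reward_for_day(day: int) -> dict:
--     """Return reward dict for a given day (1-30) in the cycle."""
--     if day <= 10:
--         if day % 2 == 0:
--             return {'pack': 'stone',   'coins': 400,  'label': 'Stone Pack + 400 coins'}
--         else:
--             return {'pack': 'wooden',  'coins': 300,  'label': 'Wooden Pack + 300 coins'}
--     elif day <= 20:
--         if day % 2 == 0:
--             return {'pack': 'silver',  'coins': 800,  'label': 'Silver Pack + 800 coins'}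
--         else:
--             return {'pack': 'bronze',  'coins': 600,  'label': 'Bronze Pack + 600 coins'}
--     elif day < 30:
--         if day % 2 == 0:
--             return {'pack': 'diamond', 'coins': 1500, 'label': 'Diamond Pack + 1,500 coins'}
--         else:
--             return {'pack': 'gold',    'coins': 1200, 'label': 'Gold Pack + 1,200 coins'}
--     else:  # day 30 milestone
--         return {'pack': 'dragonscale', 'coins': 3000, 'label': '⭐ Dragonscale + 3,000 coins'}
--
-- def build_vote_schedule_rows(day_in_cycle: int) -> list:
--     """Build 3 separate row strings for embed fields. day_in_cycle = days collected so far (0-30)."""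
--     ranges = [('Days 1-10', 1, 10), ('Days 11-20', 11, 20), ('Days 21-30', 21, 30)]
--     rows = []
--     for label, start, end in ranges:
--         row = ""
--         for day in range(start, end + 1):
--             reward = get_vote_reward_for_day(day)
--             pack = reward['pack']
--             if day <= day_in_cycle:
--                 row += DRAGONSCALE_EMOJI_CLAIMED if pack == 'dragonscale' else PACK_EMOJIS[pack]['open']
--             else:
--                 row += DRAGONSCALE_EMOJI if pack == 'dragonscale' else PACK_EMOJIS[pack]['closed']
--         rows.append((label, row))
--     return rows
-- ===== SOURCE B (Python) =====
-- PACK_EMOJIS = {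
--     'wooden':  {'closed': '<:woodenchest:1446170002708238476>',  'open': '✅'},
--     'stone':   {'closed': '<:stonechest:1446169958265389247>',   'open': '✅'},
--     'bronze':  {'closed': '<:bronzechest:1446169758599745586>',  'open': '✅'},
--     'silver':  {'closed': '<:silverchest:1446169917996011520>',  'open': '✅'},
--     'gold':    {'closed': '<:goldchest:1446169876438978681>',    'open': '✅'},
--     'diamond': {'closed': '<:diamondchest:1446169830720929985>', 'open': '✅'},
-- }
--
-- DRAGONSCALE_EMOJI = '<:dragonscale:1446278170998341693>'
--
-- DRAGONSCALE_EMOJI_CLAIMED = '✅'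
--
-- # closed (unclaimed) emoji for each day, computed from the day's tier and parity
-- _CLOSED_BY_TIER = [
--     (PACK_EMOJIS['wooden']['closed'], PACK_EMOJIS['stone']['closed']),
--     (PACK_EMOJIS['bronze']['closed'], PACK_EMOJIS['silver']['closed']),
--     (PACK_EMOJIS['gold']['closed'],   PACK_EMOJIS['diamond']['closed']),
-- ]
--
-- def _closed_emoji(day):
--     if day == 30:
--         return DRAGONSCALE_EMOJI
--     return _CLOSED_BY_TIER[(day - 1) // 10][day % 2 == 0]
--
-- def build_vote_schedule_rows(day_in_cycle):
--     """Build 3 separate row strings for embed fields. day_in_cycle = days collected so far (0-30)."""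
--     emojis = ['✅' if day <= day_in_cycle else _closed_emoji(day)
--               for day in range(1, 31)]
--     labels = ['Days 1-10', 'Days 11-20', 'Days 21-30']
--     return [(labels[i], ''.join(emojis[10 * i:10 * i + 10])) for i in range(3)]
-- ===== Notes on version B (the rewrite author's own statement) =====
-- stated objective: simpler
-- what changed: Replaces A's nested ranges/days loops with reward-dict lookups and a per-pack emoji table walk by one flat pass over days 1-30 (claimed days are always the single check-mark emoji; unclaimed ones come from tier/parity arithmetic over a 3-entry table) followed by chunking the 30 emojis into three labelled rows of 10.
import Mathlib
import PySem

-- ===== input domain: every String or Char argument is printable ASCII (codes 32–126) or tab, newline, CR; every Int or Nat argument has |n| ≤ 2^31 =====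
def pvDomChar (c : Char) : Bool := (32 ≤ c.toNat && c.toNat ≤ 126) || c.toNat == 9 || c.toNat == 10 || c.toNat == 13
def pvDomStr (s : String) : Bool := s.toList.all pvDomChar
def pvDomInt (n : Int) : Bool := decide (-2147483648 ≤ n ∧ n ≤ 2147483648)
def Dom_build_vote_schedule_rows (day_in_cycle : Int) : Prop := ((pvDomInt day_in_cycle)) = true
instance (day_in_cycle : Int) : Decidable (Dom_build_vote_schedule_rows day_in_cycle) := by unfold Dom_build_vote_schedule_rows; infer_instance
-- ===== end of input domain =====

-- B replaces A's nested ranges loop by one flat pass over the 30 days (closed emoji computed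
-- from tier/parity arithmetic) followed by chunking into three labelled rows; objective: simpler.

-- ===== PORT A =====
-- Python dict values mix strings and ints; RVal is the value type of the reward dict.
inductive RVal where
  | s : String → RVal
  | i : Int → RVal
deriving DecidableEq, Repr

def PACK_EMOJIS : PySem.Dict String (PySem.Dict String String) :=
  PySem.Dict.ofList [
    ("wooden",  PySem.Dict.ofList [("closed", "<:woodenchest:1446170002708238476>"),  ("open", "✅")]),
    ("stone",   PySem.Dict.ofList [("closed", "<:stonechest:1446169958265389247>"),   ("open", "✅")]),
    ("bronze",  PySem.Dict.ofList [("closed", "<:bronzechest:1446169758599745586>"),  ("open", "✅")]),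
    ("silver",  PySem.Dict.ofList [("closed", "<:silverchest:1446169917996011520>"),  ("open", "✅")]),
    ("gold",    PySem.Dict.ofList [("closed", "<:goldchest:1446169876438978681>"),    ("open", "✅")]),
    ("diamond", PySem.Dict.ofList [("closed", "<:diamondchest:1446169830720929985>"), ("open", "✅")])]

def DRAGONSCALE_EMOJI : String := "<:dragonscale:1446278170998341693>"

def DRAGONSCALE_EMOJI_CLAIMED : String := "✅"

def get_vote_reward_for_day (day : Int) : PySem.Dict String RVal :=
  if day ≤ 10 then
    if PySem.Int.mod day 2 = 0 then
      PySem.Dict.ofList [("pack", .s "stone"),   ("coins", .i 400),  ("label", .s "Stone Pack + 400 coins")]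
    else
      PySem.Dict.ofList [("pack", .s "wooden"),  ("coins", .i 300),  ("label", .s "Wooden Pack + 300 coins")]
  else if day ≤ 20 then
    if PySem.Int.mod day 2 = 0 then
      PySem.Dict.ofList [("pack", .s "silver"),  ("coins", .i 800),  ("label", .s "Silver Pack + 800 coins")]
    else
      PySem.Dict.ofList [("pack", .s "bronze"),  ("coins", .i 600),  ("label", .s "Bronze Pack + 600 coins")]
  else if day < 30 then
    if PySem.Int.mod day 2 = 0 then
      PySem.Dict.ofList [("pack", .s "diamond"), ("coins", .i 1500), ("label", .s "Diamond Pack + 1,500 coins")]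
    else
      PySem.Dict.ofList [("pack", .s "gold"),    ("coins", .i 1200), ("label", .s "Gold Pack + 1,200 coins")]
  else
    PySem.Dict.ofList [("pack", .s "dragonscale"), ("coins", .i 3000), ("label", .s "⭐ Dragonscale + 3,000 coins")]

-- reward['pack'] and the two-level PACK_EMOJIS lookups never raise for the days A ever passes
-- (the keys are always present), so the defaults below are never used; exact elsewhere.
def build_vote_schedule_rows (day_in_cycle : Int) : List (String × String) :=
  let ranges : List (String × Int × Int) := [("Days 1-10", 1, 10), ("Days 11-20", 11, 20), ("Days 21-30", 21, 30)]
  let rows : List (String × String) := []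
  ranges.foldl (fun rows r =>
    let label := r.1
    let start := r.2.1
    let stop := r.2.2
    let row := (PySem.List.pyRange start (stop + 1) 1).foldl (fun row day =>
      let reward := get_vote_reward_for_day day
      let pack : String := match PySem.Dict.get? reward "pack" with
        | some (RVal.s p) => p
        | _ => ""
      if day ≤ day_in_cycle then
        row ++ (if pack == "dragonscale" then DRAGONSCALE_EMOJI_CLAIMED
                else (PySem.Dict.getD PACK_EMOJIS pack PySem.Dict.empty).getD "open" "")
      else
        row ++ (if pack == "dragonscale" then DRAGONSCALE_EMOJI
                else (PySem.Dict.getD PACK_EMOJIS pack PySem.Dict.empty).getD "closed" "")) ""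
    rows ++ [(label, row)]) rows

-- ===== PORT B =====
def CLOSED_BY_TIER : List (String × String) :=
  [(PySem.Dict.getD (PySem.Dict.getD PACK_EMOJIS "wooden" PySem.Dict.empty) "closed" "",
    PySem.Dict.getD (PySem.Dict.getD PACK_EMOJIS "stone" PySem.Dict.empty) "closed" ""),
   (PySem.Dict.getD (PySem.Dict.getD PACK_EMOJIS "bronze" PySem.Dict.empty) "closed" "",
    PySem.Dict.getD (PySem.Dict.getD PACK_EMOJIS "silver" PySem.Dict.empty) "closed" ""),
   (PySem.Dict.getD (PySem.Dict.getD PACK_EMOJIS "gold" PySem.Dict.empty) "closed" "",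
    PySem.Dict.getD (PySem.Dict.getD PACK_EMOJIS "diamond" PySem.Dict.empty) "closed" "")]

-- _CLOSED_BY_TIER[(day-1)//10][day % 2 == 0]; the tier index is in range for every day B
-- passes (1..29), so the defaults are never used; Python's bool index True/False is 1/0.
def closed_emoji (day : Int) : String :=
  if day = 30 then DRAGONSCALE_EMOJI
  else
    let pair := PySem.List.pyGetD CLOSED_BY_TIER (PySem.Int.floordiv (day - 1) 10) ("", "")
    if PySem.Int.mod day 2 = 0 then pair.2 else pair.1

def build_vote_schedule_rows_alt (day_in_cycle : Int) : List (String × String) :=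
  let emojis : List String :=
    (PySem.List.pyRange 1 31 1).map (fun day =>
      if day ≤ day_in_cycle then "✅" else closed_emoji day)
  let labels : List String := ["Days 1-10", "Days 11-20", "Days 21-30"]
  (PySem.List.pyRange 0 3 1).map (fun i =>
    (PySem.List.pyGetD labels i "",
     PySem.Str.join "" (PySem.List.slice emojis (some (10 * i)) (some (10 * i + 10)))))

-- ===== PRECONDITION & SPEC =====
def Spec_build_vote_schedule_rows (day_in_cycle : Int) (out : List (String × String)) : Prop := out = build_vote_schedule_rows_alt day_in_cycle
instance (day_in_cycle : Int) (out : List (String × String)) : Decidable (Spec_build_vote_schedule_rows day_in_cycle out) := by unfold Spec_build_vote_schedule_rows; infer_instance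

-- ===== CLAIM (what is proved, stated in full; the proofs are below) =====
def Claim_equal_build_vote_schedule_rows : Prop := ∀ (day_in_cycle : Int), Dom_build_vote_schedule_rows day_in_cycle → Spec_build_vote_schedule_rows day_in_cycle (build_vote_schedule_rows day_in_cycle)


-- ===== LEMMAS AND PROOFS =====

lemma pyRangeA1 : PySem.List.pyRange 1 11 1 = [1,2,3,4,5,6,7,8,9,10] := by decide
lemma pyRangeA2 : PySem.List.pyRange 11 21 1 = [11,12,13,14,15,16,17,18,19,20] := by decide
lemma pyRangeA3 : PySem.List.pyRange 21 31 1 = [21,22,23,24,25,26,27,28,29,30] := by decide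
lemma pyRangeB : PySem.List.pyRange 1 31 1 =
    [1,2,3,4,5,6,7,8,9,10,11,12,13,14,15,16,17,18,19,20,21,22,23,24,25,26,27,28,29,30] := by decide
lemma pyRangeB3 : PySem.List.pyRange 0 3 1 = [0,1,2] := by decide

-- Both ports reduce, day by day, to the same per-day emoji 'if day ≤ d then "✅" else <closed>';
-- the rows are then equal as concatenations of the same 30 conditionals.
lemma ports_agree (d : Int) : build_vote_schedule_rows d = build_vote_schedule_rows_alt d := by
  -- A's step appends inside both branches; pull the accumulator out of the if
  have hpull : ∀ (row x y : String) (c : Prop) (inst : Decidable c),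
      (if c then row ++ x else row ++ y) = row ++ (if c then x else y) :=
    fun row x y c inst => (apply_ite (row ++ ·) c x y).symm
  -- reward['pack'] at each concrete day
  have g1 : (get_vote_reward_for_day 1).get? "pack" = some (RVal.s "wooden") := by decide
  have g2 : (get_vote_reward_for_day 2).get? "pack" = some (RVal.s "stone") := by decide
  have g3 : (get_vote_reward_for_day 3).get? "pack" = some (RVal.s "wooden") := by decide
  have g4 : (get_vote_reward_for_day 4).get? "pack" = some (RVal.s "stone") := by decide
  have g5 : (get_vote_reward_for_day 5).get? "pack" = some (RVal.s "wooden") := by decide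
  have g6 : (get_vote_reward_for_day 6).get? "pack" = some (RVal.s "stone") := by decide
  have g7 : (get_vote_reward_for_day 7).get? "pack" = some (RVal.s "wooden") := by decide
  have g8 : (get_vote_reward_for_day 8).get? "pack" = some (RVal.s "stone") := by decide
  have g9 : (get_vote_reward_for_day 9).get? "pack" = some (RVal.s "wooden") := by decide
  have g10 : (get_vote_reward_for_day 10).get? "pack" = some (RVal.s "stone") := by decide
  have g11 : (get_vote_reward_for_day 11).get? "pack" = some (RVal.s "bronze") := by decide
  have g12 : (get_vote_reward_for_day 12).get? "pack" = some (RVal.s "silver") := by decide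
  have g13 : (get_vote_reward_for_day 13).get? "pack" = some (RVal.s "bronze") := by decide
  have g14 : (get_vote_reward_for_day 14).get? "pack" = some (RVal.s "silver") := by decide
  have g15 : (get_vote_reward_for_day 15).get? "pack" = some (RVal.s "bronze") := by decide
  have g16 : (get_vote_reward_for_day 16).get? "pack" = some (RVal.s "silver") := by decide
  have g17 : (get_vote_reward_for_day 17).get? "pack" = some (RVal.s "bronze") := by decide
  have g18 : (get_vote_reward_for_day 18).get? "pack" = some (RVal.s "silver") := by decide
  have g19 : (get_vote_reward_for_day 19).get? "pack" = some (RVal.s "bronze") := by decide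
  have g20 : (get_vote_reward_for_day 20).get? "pack" = some (RVal.s "silver") := by decide
  have g21 : (get_vote_reward_for_day 21).get? "pack" = some (RVal.s "gold") := by decide
  have g22 : (get_vote_reward_for_day 22).get? "pack" = some (RVal.s "diamond") := by decide
  have g23 : (get_vote_reward_for_day 23).get? "pack" = some (RVal.s "gold") := by decide
  have g24 : (get_vote_reward_for_day 24).get? "pack" = some (RVal.s "diamond") := by decide
  have g25 : (get_vote_reward_for_day 25).get? "pack" = some (RVal.s "gold") := by decide
  have g26 : (get_vote_reward_for_day 26).get? "pack" = some (RVal.s "diamond") := by decide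
  have g27 : (get_vote_reward_for_day 27).get? "pack" = some (RVal.s "gold") := by decide
  have g28 : (get_vote_reward_for_day 28).get? "pack" = some (RVal.s "diamond") := by decide
  have g29 : (get_vote_reward_for_day 29).get? "pack" = some (RVal.s "gold") := by decide
  have g30 : (get_vote_reward_for_day 30).get? "pack" = some (RVal.s "dragonscale") := by decide
  -- the emoji table lookups at each concrete pack
  have eo0 : (PySem.Dict.getD PACK_EMOJIS "wooden" PySem.Dict.empty).getD "open" "" = "✅" := by decide
  have ec0 : (PySem.Dict.getD PACK_EMOJIS "wooden" PySem.Dict.empty).getD "closed" "" = "<:woodenchest:1446170002708238476>" := by decide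
  have eo1 : (PySem.Dict.getD PACK_EMOJIS "stone" PySem.Dict.empty).getD "open" "" = "✅" := by decide
  have ec1 : (PySem.Dict.getD PACK_EMOJIS "stone" PySem.Dict.empty).getD "closed" "" = "<:stonechest:1446169958265389247>" := by decide
  have eo2 : (PySem.Dict.getD PACK_EMOJIS "bronze" PySem.Dict.empty).getD "open" "" = "✅" := by decide
  have ec2 : (PySem.Dict.getD PACK_EMOJIS "bronze" PySem.Dict.empty).getD "closed" "" = "<:bronzechest:1446169758599745586>" := by decide
  have eo3 : (PySem.Dict.getD PACK_EMOJIS "silver" PySem.Dict.empty).getD "open" "" = "✅" := by decide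
  have ec3 : (PySem.Dict.getD PACK_EMOJIS "silver" PySem.Dict.empty).getD "closed" "" = "<:silverchest:1446169917996011520>" := by decide
  have eo4 : (PySem.Dict.getD PACK_EMOJIS "gold" PySem.Dict.empty).getD "open" "" = "✅" := by decide
  have ec4 : (PySem.Dict.getD PACK_EMOJIS "gold" PySem.Dict.empty).getD "closed" "" = "<:goldchest:1446169876438978681>" := by decide
  have eo5 : (PySem.Dict.getD PACK_EMOJIS "diamond" PySem.Dict.empty).getD "open" "" = "✅" := by decide
  have ec5 : (PySem.Dict.getD PACK_EMOJIS "diamond" PySem.Dict.empty).getD "closed" "" = "<:diamondchest:1446169830720929985>" := by decide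
  simp only [build_vote_schedule_rows, build_vote_schedule_rows_alt]
  simp [pyRangeA1, pyRangeA2, pyRangeA3, pyRangeB, pyRangeB3, closed_emoji, CLOSED_BY_TIER,
    DRAGONSCALE_EMOJI, DRAGONSCALE_EMOJI_CLAIMED, PySem.List.slice, PySem.Str.join,
    PySem.List.pyGetD, PySem.Int.floordiv, PySem.Int.mod, hpull,
    g1, g2, g3, g4, g5, g6, g7, g8, g9, g10, g11, g12, g13, g14, g15, g16, g17, g18, g19, g20, g21, g22, g23, g24, g25, g26, g27, g28, g29, g30,
    eo0, ec0, eo1, ec1, eo2, ec2, eo3, ec3, eo4, ec4, eo5, ec5]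
  simp [← String.toList_inj, String.toList_append, String.toList_ofList,
    PySem.Chars.join_cons_cons, PySem.Chars.join_singleton, List.append_assoc]

-- ===== VERDICT (by name: the statement is the Claim_ definition above) =====
theorem build_vote_schedule_rows_spec : Claim_equal_build_vote_schedule_rows := by
  intro d _
  unfold Spec_build_vote_schedule_rows
  exact ports_agree d
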